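-- pv_equiv track=rewrite | github.com/numtide/nix-ai-tools | packages/backlog-md/update.py | _replace_nth_hash
-- ===== SOURCE A (Python) =====
-- def _replace_nth_hash(content: str, n: int, new_hash: str) -> str:
--     """Replace the nth occurrence of a hash in the content.
--
--     Args:
--         content: File content
--         n: Which hash occurrence to replace (1-indexed)
--         new_hash: New hash value
--
--     Returns:
--         Updated content
--
--     """
--     lines = content.split("\n")
--     updated_lines = []
--     hash_count = 0
--     for line in lines:
--         if 'hash = "sha256-' in line:
--             hash_count += 1
--             if hash_count == n:
--                 indent = len(line) - len(line.lstrip())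
--                 updated_lines.append(f'{" " * indent}hash = "{new_hash}";')
--             else:
--                 updated_lines.append(line)
--         else:
--             updated_lines.append(line)
--     return "\n".join(updated_lines)
-- ===== SOURCE B (Python) =====
-- def _replace_nth_hash(content: str, n: int, new_hash: str) -> str:
--     lines = content.split("\n")
--     marker = 'hash = "sha256-'
--     matches = [i for i, line in enumerate(lines) if marker in line]
--     if 1 <= n <= len(matches):
--         i = matches[n - 1]
--         indent = len(lines[i]) - len(lines[i].lstrip())
--         lines[i] = " " * indent + f'hash = "{new_hash}";'
--     return "\n".join(lines)
-- ===== Notes on version B (the rewrite author's own statement) =====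
-- stated objective: idiomatic
-- what changed: Instead of rebuilding the line list inside a counting loop, B collects the indices of all marker lines once with a comprehension and then surgically assigns the single nth matching line, guarded by a range check.
import Mathlib
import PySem

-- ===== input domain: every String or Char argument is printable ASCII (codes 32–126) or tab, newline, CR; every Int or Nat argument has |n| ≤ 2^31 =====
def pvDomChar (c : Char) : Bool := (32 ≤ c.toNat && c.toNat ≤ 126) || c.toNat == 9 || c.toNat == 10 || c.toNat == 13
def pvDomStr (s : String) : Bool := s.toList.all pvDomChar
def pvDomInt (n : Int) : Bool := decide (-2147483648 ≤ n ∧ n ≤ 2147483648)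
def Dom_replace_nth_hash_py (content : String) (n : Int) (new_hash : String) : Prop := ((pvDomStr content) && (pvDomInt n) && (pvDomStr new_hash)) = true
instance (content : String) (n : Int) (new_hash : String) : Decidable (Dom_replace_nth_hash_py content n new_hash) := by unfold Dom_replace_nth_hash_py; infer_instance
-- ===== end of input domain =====

-- B replaces A's counting loop that rebuilds the whole line list by a one-shot index
-- comprehension plus a single surgical assignment of the nth matching line (idiomatic; same cost).

-- ===== PORT A =====
-- literal port of Source A: split on "\n", fold over the lines with (hash_count, updated_lines),
-- append either the rebuilt hash line or the original line, join with "\n".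
-- content.split("\n") with a nonempty separator is PySem.Str.split? …, always `some` here.
def replace_nth_hash_py (content : String) (n : Int) (new_hash : String) : String :=
  let lines := (PySem.Str.split? content "\n").getD []
  let st := lines.foldl (fun (st : Int × List String) line =>
    if PySem.Str.isIn "hash = \"sha256-" line then
      if st.1 + 1 == n then
        -- f'{" " * indent}hash = "{new_hash}";' with indent = len(line) - len(line.lstrip()),
        -- exact as char-list concatenation (" " * i is empty for i ≤ 0, hence .toNat)
        (st.1 + 1, st.2 ++ [String.ofList (List.replicate (PySem.Str.len line - PySem.Str.len (PySem.Str.lstrip line)).toNat ' ' ++ "hash = \"".toList ++ new_hash.toList ++ "\";".toList)])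
      else (st.1 + 1, st.2 ++ [line])
    else (st.1, st.2 ++ [line])) ((0 : Int), ([] : List String))
  PySem.Str.join "\n" st.2

-- ===== PORT B =====
-- literal port of Source B: collect the indices of all marker lines once (comprehension over
-- enumerate), then, if 1 <= n <= len(matches), assign the single line lines[matches[n-1]].
def replace_nth_hash_py_alt (content : String) (n : Int) (new_hash : String) : String :=
  let lines := (PySem.Str.split? content "\n").getD []
  let matchIdxs : List Int :=
    ((PySem.List.enumerate lines 0).filter (fun p => PySem.Str.isIn "hash = \"sha256-" p.2)).map (·.1)
  let lines' :=
    if 1 ≤ n ∧ n ≤ (matchIdxs.length : Int) then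
      let i := PySem.List.pyGetD matchIdxs (n - 1) 0      -- matches[n-1]; in range by the guard
      let line := PySem.List.pyGetD lines i ""            -- lines[i]; i is a valid index of lines
      lines.set i.toNat (String.ofList (List.replicate (PySem.Str.len line - PySem.Str.len (PySem.Str.lstrip line)).toNat ' ' ++ "hash = \"".toList ++ new_hash.toList ++ "\";".toList))
    else lines
  PySem.Str.join "\n" lines'

-- ===== PRECONDITION & SPEC =====
def Spec_replace_nth_hash_py (content : String) (n : Int) (new_hash : String) (out : String) : Prop := out = replace_nth_hash_py_alt content n new_hash
instance (content : String) (n : Int) (new_hash : String) (out : String) : Decidable (Spec_replace_nth_hash_py content n new_hash out) := by unfold Spec_replace_nth_hash_py; infer_instance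

-- ===== CLAIM (what is proved, stated in full; the proofs are below) =====
def Claim_equal_replace_nth_hash_py : Prop := ∀ (content : String) (n : Int) (new_hash : String), Dom_replace_nth_hash_py content n new_hash → Spec_replace_nth_hash_py content n new_hash (replace_nth_hash_py content n new_hash)

-- ===== LEMMAS AND PROOFS =====

-- the marker test and the replacement line, shared vocabulary of the proofs
def pvP (line : String) : Bool := PySem.Str.isIn "hash = \"sha256-" line

def pvRepl (nh : String) (line : String) : String :=
  String.ofList (List.replicate (PySem.Str.len line - PySem.Str.len (PySem.Str.lstrip line)).toNat ' '
    ++ "hash = \"".toList ++ nh.toList ++ "\";".toList)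

-- reference recursion: replace the m-th (1-indexed) marker line
def pvRep (nh : String) (m : Int) : List String → List String
  | [] => []
  | l :: ls => if pvP l then (if m == 1 then pvRepl nh l else l) :: pvRep nh (m - 1) ls
               else l :: pvRep nh m ls

-- indices (as Nats) of the marker lines
def pvIdx : List String → List Nat
  | [] => []
  | l :: ls => if pvP l then 0 :: (pvIdx ls).map (· + 1) else (pvIdx ls).map (· + 1)

theorem pvRep_of_nonpos (nh : String) (m : Int) (ls : List String) (h : m ≤ 0) :
    pvRep nh m ls = ls := by
  induction ls generalizing m with
  | nil => rfl
  | cons l ls ih =>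
    simp only [pvRep]
    rw [show (m == 1) = false by simp; omega]
    by_cases hp : pvP l
    · simp [hp, ih (m - 1) (by omega)]
    · simp [hp, ih m h]

theorem pvRep_of_gt (nh : String) (m : Int) (ls : List String)
    (h : ((pvIdx ls).length : Int) < m) : pvRep nh m ls = ls := by
  induction ls generalizing m with
  | nil => rfl
  | cons l ls ih =>
    simp only [pvRep, pvIdx] at *
    by_cases hp : pvP l
    · simp only [hp, if_true, List.length_cons] at h ⊢
      rw [show (m == 1) = false by simp; push_cast at h; omega]
      simp only [Bool.false_eq_true, if_false, List.cons.injEq, true_and]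
      exact ih (m - 1) (by simp at h ⊢; omega)
    · simp only [hp, Bool.false_eq_true, if_false] at h ⊢
      simp only [List.cons.injEq, true_and]
      exact ih m (by simpa using h)

theorem pvFoldA (nh : String) (n : Int) : ∀ (ls : List String) (c : Int) (acc : List String),
    (ls.foldl (fun (st : Int × List String) line =>
      if PySem.Str.isIn "hash = \"sha256-" line then
        if st.1 + 1 == n then
          (st.1 + 1, st.2 ++ [String.ofList (List.replicate (PySem.Str.len line - PySem.Str.len (PySem.Str.lstrip line)).toNat ' ' ++ "hash = \"".toList ++ nh.toList ++ "\";".toList)])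
        else (st.1 + 1, st.2 ++ [line])
      else (st.1, st.2 ++ [line])) (c, acc)).2 = acc ++ pvRep nh (n - c) ls := by
  intro ls
  induction ls with
  | nil => intro c acc; simp [pvRep]
  | cons l ls ih =>
    intro c acc
    simp only [List.foldl_cons, pvRep]
    by_cases hp : pvP l
    · rw [show PySem.Str.isIn "hash = \"sha256-" l = true from hp]
      simp only [if_true]
      by_cases hc : c + 1 = n
      · have h1 : (c + 1 == n) = true := by simp [hc]
        have h2 : (n - c == 1) = true := by simp; omega
        simp only [h1, h2, if_true, ih, hp]
        rw [show n - (c + 1) = n - c - 1 by ring]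
        simp [pvRepl]
      · have h1 : (c + 1 == n) = false := by simp [hc]
        have h2 : (n - c == 1) = false := by simp; omega
        simp only [h1, h2, Bool.false_eq_true, if_false, ih, hp, if_true]
        simp [show n - (c + 1) = n - c - 1 by omega]
    · rw [show PySem.Str.isIn "hash = \"sha256-" l = false by simpa [pvP] using hp]
      simp only [Bool.false_eq_true, if_false, ih, hp]
      simp

theorem pvEnumFilter : ∀ (ls : List String) (s : Nat),
    (((PySem.List.enumerate ls (s : Int)).filter (fun p => pvP p.2)).map (·.1))
      = (pvIdx ls).map (fun k => ((s + k : Nat) : Int)) := by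
  intro ls
  induction ls with
  | nil => intro s; simp [PySem.List.enumerate_nil, pvIdx]
  | cons l ls ih =>
    intro s
    rw [PySem.List.enumerate_cons]
    have h := ih (s + 1)
    simp only [pvIdx]
    by_cases hp : pvP l
    · simp only [List.filter_cons, hp, if_true, List.map_cons]
      push_cast at h ⊢
      rw [h]
      simp only [List.map_map]
      congr 1
      all_goals first
        | (simp; done)
        | (refine List.map_congr_left fun a _ => ?_
           simp only [Function.comp]
           push_cast
           omega)
    · simp only [List.filter_cons, hp, Bool.false_eq_true, if_false]
      push_cast at h ⊢
      rw [h]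
      simp only [List.map_map]
      refine List.map_congr_left fun a _ => ?_
      simp only [Function.comp]
      push_cast
      omega

theorem pvSetMatch (nh : String) : ∀ (ls : List String) (j : Nat), j < (pvIdx ls).length →
    ls.set ((pvIdx ls).getD j 0) (pvRepl nh (ls.getD ((pvIdx ls).getD j 0) ""))
      = pvRep nh ((j : Int) + 1) ls := by
  intro ls
  induction ls with
  | nil => intro j h; simp [pvIdx] at h
  | cons l ls ih =>
    intro j h
    simp only [pvIdx, pvRep] at *
    by_cases hp : pvP l <;> simp only [hp, if_true, Bool.false_eq_true, if_false] at h ⊢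
    · cases j with
      | zero =>
        simp [pvRep_of_nonpos nh 0 ls (by omega)]
      | succ j' =>
        have hj : j' < (pvIdx ls).length := by simp at h; omega
        have hget : ((0 : Nat) :: (pvIdx ls).map (· + 1)).getD (j' + 1) 0
            = (pvIdx ls).getD j' 0 + 1 := by
          simp only [List.getD_cons_succ]
          rw [List.getD_eq_getElem _ _ (by simpa using hj), List.getD_eq_getElem _ _ hj]
          simp
        rw [hget]
        simp only [List.set_cons_succ, List.getD_cons_succ]
        have h1 : ((((j' : Nat) + 1 : Nat) : Int) + 1 == 1) = false := by simp; omega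
        rw [h1]
        simp only [Bool.false_eq_true, if_false]
        congr 1
        rw [show (((j' + 1 : Nat) : Int) + 1 - 1) = ((j' : Int) + 1) by push_cast; ring]
        exact ih j' hj
    · have hlen : j < (pvIdx ls).length := by simpa using h
      have hget : ((pvIdx ls).map (· + 1)).getD j 0 = (pvIdx ls).getD j 0 + 1 := by
        rw [List.getD_eq_getElem _ _ (by simpa using hlen), List.getD_eq_getElem _ _ hlen]
        simp
      rw [hget]
      simp only [List.set_cons_succ, List.getD_cons_succ]
      congr 1
      exact ih j hlen

-- ===== VERDICT (by name: the statement is the Claim_ definition above) =====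
theorem replace_nth_hash_py_spec : Claim_equal_replace_nth_hash_py := by
  intro content n new_hash _
  show replace_nth_hash_py content n new_hash = replace_nth_hash_py_alt content n new_hash
  simp only [replace_nth_hash_py, replace_nth_hash_py_alt]
  set lines := (PySem.Str.split? content "\n").getD [] with hlines
  rw [pvFoldA new_hash n lines 0 []]
  simp only [List.nil_append, sub_zero]
  have h := pvEnumFilter lines 0
  simp only [pvP, Nat.cast_zero, Nat.zero_add] at h
  rw [h]
  simp only [List.length_map]
  congr 1
  by_cases hn : 1 ≤ n ∧ n ≤ ((pvIdx lines).length : Int)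
  · rw [if_pos hn]
    obtain ⟨hn1, hn2⟩ := hn
    set j : Nat := (n - 1).toNat with hj
    have hnj : n = (j : Int) + 1 := by omega
    have hjl : j < (pvIdx lines).length := by omega
    have hidx : PySem.List.pyGetD ((pvIdx lines).map (fun k : Nat => (k : Int))) (n - 1) 0
        = (((pvIdx lines).getD j 0 : Nat) : Int) := by
      rw [show (n - 1) = ((j : Nat) : Int) by omega]
      rw [PySem.List.pyGetD_natCast]
      rw [List.getD_eq_getElem _ _ (by simpa using hjl), List.getD_eq_getElem _ _ hjl]
      simp
    rw [hidx, PySem.List.pyGetD_natCast, Int.toNat_natCast]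
    rw [hnj, ← pvSetMatch new_hash lines j hjl]
    rfl
  · rw [if_neg hn]
    rcases Int.lt_or_le n 1 with h1 | h1
    · exact pvRep_of_nonpos new_hash n lines (by omega)
    · exact pvRep_of_gt new_hash n lines (by omega)
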